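-- pv_equiv track=rewrite | github.com/KiaOnigiri/Python | python/EGE/Статград/1-2023/1-14.py | fromAny
-- ===== SOURCE A (Python) =====
-- def fromAny(x,y):
--     x=x[::-1]
--     g=0
--     for i in range(len(x)):
--         if x[i].isdigit()==False:
--             c=ord(x[i])-ord('A')+10
--         else:
--             c=int(x[i])
--         g+=c*(y**i)
--     return g
-- ===== SOURCE B (Python) =====
-- def fromAny(x, y):
--     # Horner's method: left-to-right, no reversal, no exponentiation.
--     g = 0
--     for ch in x:
--         if ch.isdigit():
--             c = int(ch)
--         else:
--             c = ord(ch) - ord('A') + 10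
--         g = g * y + c
--     return g
-- ===== Notes on version B (the rewrite author's own statement) =====
-- stated objective: faster
-- what changed: Replaces the reverse-the-string, index-based power sum (c * y**i per position) with Horner's rule: a single left-to-right pass maintaining g = g*y + c, removing the reversal and all exponentiations.
import Mathlib
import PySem

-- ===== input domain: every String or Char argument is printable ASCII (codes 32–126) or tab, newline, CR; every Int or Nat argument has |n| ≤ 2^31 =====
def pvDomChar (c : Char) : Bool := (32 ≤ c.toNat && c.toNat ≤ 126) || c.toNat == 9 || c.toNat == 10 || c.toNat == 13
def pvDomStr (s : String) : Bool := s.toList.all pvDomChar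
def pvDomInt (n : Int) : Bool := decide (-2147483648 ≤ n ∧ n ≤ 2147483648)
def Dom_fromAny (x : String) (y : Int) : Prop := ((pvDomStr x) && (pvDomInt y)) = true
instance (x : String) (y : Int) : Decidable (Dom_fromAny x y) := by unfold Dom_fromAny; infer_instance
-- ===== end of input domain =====

-- B replaces A's reverse-and-power-sum with a single left-to-right Horner pass (g = g*y + c); same return value.

-- ===== PORT A =====
def fromAny (x : String) (y : Int) : Int :=
  -- x = x[::-1]
  let xs : List Char := ((PySem.Str.slice? x none none (-1)).getD "").toList
  -- for i in range(len(x)): g += c * (y ** i)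
  (PySem.List.pyRange 0 (xs.length : Int) 1).foldl
    (fun g i =>
      let ch := PySem.List.pyGetD xs i ' '
      let c : Int :=
        if PySem.Chars.isdigit ch = false
        then (ch.toNat : Int) - ('A'.toNat : Int) + 10
        else (PySem.Int.ofChars? [ch]).getD 0      -- int(x[i]); never none when isdigit holds
      g + c * y ^ i.toNat) 0

-- ===== PORT B =====
def fromAny_alt (x : String) (y : Int) : Int :=
  x.toList.foldl
    (fun g ch =>
      let c : Int :=
        if PySem.Chars.isdigit ch
        then (PySem.Int.ofChars? [ch]).getD 0      -- int(ch); never none when isdigit holds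
        else (ch.toNat : Int) - ('A'.toNat : Int) + 10
      g * y + c) 0

-- ===== PRECONDITION & SPEC =====
def Spec_fromAny (x : String) (y : Int) (out : Int) : Prop := out = fromAny_alt x y
instance (x : String) (y : Int) (out : Int) : Decidable (Spec_fromAny x y out) := by unfold Spec_fromAny; infer_instance

-- ===== CLAIM (what is proved, stated in full; the proofs are below) =====
def Claim_equal_fromAny : Prop := ∀ (x : String) (y : Int), Dom_fromAny x y → Spec_fromAny x y (fromAny x y)

-- ===== LEMMAS AND PROOFS =====

/-- The per-character value both programs compute. -/
def pvCv (ch : Char) : Int :=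
  if PySem.Chars.isdigit ch
  then (PySem.Int.ofChars? [ch]).getD 0
  else (ch.toNat : Int) - ('A'.toNat : Int) + 10

/-- Little-endian (least-significant-first) base-`y` value of a digit list. -/
def pvRevVal (y : Int) : List Char → Int
  | [] => 0
  | c :: t => pvCv c + y * pvRevVal y t

theorem pvRevVal_snoc (y : Int) (rs : List Char) (c : Char) :
    pvRevVal y (rs ++ [c]) = pvRevVal y rs + pvCv c * y ^ rs.length := by
  induction rs with
  | nil => simp [pvRevVal]
  | cons a t ih => simp [pvRevVal, ih, pow_succ]; ring

theorem pvA_fold (y : Int) (rs : List Char) :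
    (PySem.List.pyRange 0 (rs.length : Int) 1).foldl
      (fun g i => g + pvCv (PySem.List.pyGetD rs i ' ') * y ^ i.toNat) 0
    = pvRevVal y rs := by
  induction rs using List.reverseRecOn with
  | nil => simp [PySem.List.pyRange_one_eq_nil, pvRevVal]
  | append_singleton rs c ih =>
    have hlen : ((rs ++ [c]).length : Int) = (rs.length : Int) + 1 := by
      simp
    rw [hlen, PySem.List.pyRange_one_succ_right (by positivity), List.foldl_append]
    have hcongr :
        (PySem.List.pyRange 0 (rs.length : Int) 1).foldl
          (fun g i => g + pvCv (PySem.List.pyGetD (rs ++ [c]) i ' ') * y ^ i.toNat) 0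
        = (PySem.List.pyRange 0 (rs.length : Int) 1).foldl
          (fun g i => g + pvCv (PySem.List.pyGetD rs i ' ') * y ^ i.toNat) 0 := by
      apply PySem.List.foldl_congr_mem
      intro g i hi
      have hmem := (PySem.List.mem_pyRange_one).1 hi
      have h1 : PySem.List.pyGetD (rs ++ [c]) i ' ' = PySem.List.pyGetD rs i ' ' := by
        rw [PySem.List.pyGetD_eq_getElem (rs ++ [c]) ' ' hmem.1 (by simp; omega),
            PySem.List.pyGetD_eq_getElem rs ' ' hmem.1 hmem.2]
        exact List.getElem_append_left (by omega)
      rw [h1]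
    rw [hcongr, ih]
    have hlast : PySem.List.pyGetD (rs ++ [c]) ((rs.length : Nat) : Int) ' ' = c := by
      rw [PySem.List.pyGetD_natCast]
      simp
    simp only [List.foldl_cons, List.foldl_nil]
    rw [hlast, pvRevVal_snoc]
    simp

theorem pvB_fold (y : Int) (cs : List Char) (g : Int) :
    cs.foldl (fun g ch => g * y + pvCv ch) g
    = g * y ^ cs.length + pvRevVal y cs.reverse := by
  induction cs generalizing g with
  | nil => simp [pvRevVal]
  | cons c t ih =>
    simp only [List.foldl_cons, List.reverse_cons, ih, pvRevVal_snoc]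
    simp [pow_succ]
    ring

theorem pvCv_A (ch : Char) :
    (if PySem.Chars.isdigit ch = false
     then (ch.toNat : Int) - ('A'.toNat : Int) + 10
     else (PySem.Int.ofChars? [ch]).getD 0) = pvCv ch := by
  unfold pvCv
  cases PySem.Chars.isdigit ch <;> simp

theorem pvCv_B (y g : Int) (ch : Char) :
    (g * y + if PySem.Chars.isdigit ch = true
             then (PySem.Int.ofChars? [ch]).getD 0
             else (ch.toNat : Int) - ('A'.toNat : Int) + 10) = g * y + pvCv ch := by
  rw [pvCv]

-- ===== VERDICT (by name: the statement is the Claim_ definition above) =====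
theorem fromAny_spec : Claim_equal_fromAny := by
  intro x y _
  unfold Spec_fromAny fromAny fromAny_alt
  have hrev : ((PySem.Str.slice? x none none (-1)).getD "").toList = x.toList.reverse := by
    rw [PySem.Str.slice?_none_none_neg_one]
    simp
  simp only [hrev]
  have hA := pvA_fold y x.toList.reverse
  have hcongr :
      (PySem.List.pyRange 0 ((x.toList.reverse.length : Nat) : Int) 1).foldl
        (fun g i =>
          let ch := PySem.List.pyGetD x.toList.reverse i ' '
          let c : Int :=
            if PySem.Chars.isdigit ch = false
            then (ch.toNat : Int) - ('A'.toNat : Int) + 10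
            else (PySem.Int.ofChars? [ch]).getD 0
          g + c * y ^ i.toNat) 0
      = (PySem.List.pyRange 0 ((x.toList.reverse.length : Nat) : Int) 1).foldl
        (fun g i => g + pvCv (PySem.List.pyGetD x.toList.reverse i ' ') * y ^ i.toNat) 0 := by
    apply PySem.List.foldl_congr_mem
    intro g i _
    simp only [pvCv_A]
  rw [hcongr, hA]
  simp only [pvCv_B]
  rw [pvB_fold]
  simp
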